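-- pv_equiv track=rewrite | github.com/Black-Swan-SIH/resume-parse-engine | trainer.py | clean_entity_spans
-- ===== SOURCE A (Python) =====
-- def clean_entity_spans(train_data):
--     cleaned_data = []
--     for text, annotations in train_data:
--         entities = annotations['entities']
--         cleaned_entities = []
--         for start, end, label in entities:
--
--             while start < len(text) and text[start].isspace():
--                 start += 1
--             while end > start and text[end - 1].isspace():
--                 end -= 1
--
--             if start < end:
--                 cleaned_entities.append((start, end, label))
--         annotations['entities'] = cleaned_entities
--         cleaned_data.append((text, annotations))
--     return cleaned_data
-- ===== SOURCE B (Python) =====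
-- def _trim(text, span):
--     start, end, label = span
--     if end <= start:
--         return None
--     ls = text[start:end].lstrip()
--     new_start = end - len(ls)
--     new_end = new_start + len(ls.rstrip())
--     return (new_start, new_end, label) if new_start < new_end else None
--
--
-- def clean_entity_spans(train_data):
--     cleaned_data = []
--     for text, annotations in train_data:
--         annotations['entities'] = [
--             t for t in (_trim(text, s) for s in annotations['entities'])
--             if t is not None
--         ]
--         cleaned_data.append((text, annotations))
--     return cleaned_data
-- ===== Notes on version B (the rewrite author's own statement) =====
-- stated objective: idiomatic
-- what changed: Per-span pointer-stepping while-loops are replaced by slicing the span text and computing the trimmed offsets from len() of lstrip()/rstrip() (degenerate end<=start spans dropped up front), with the kept spans built by a comprehension instead of conditional appends.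
import Mathlib
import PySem

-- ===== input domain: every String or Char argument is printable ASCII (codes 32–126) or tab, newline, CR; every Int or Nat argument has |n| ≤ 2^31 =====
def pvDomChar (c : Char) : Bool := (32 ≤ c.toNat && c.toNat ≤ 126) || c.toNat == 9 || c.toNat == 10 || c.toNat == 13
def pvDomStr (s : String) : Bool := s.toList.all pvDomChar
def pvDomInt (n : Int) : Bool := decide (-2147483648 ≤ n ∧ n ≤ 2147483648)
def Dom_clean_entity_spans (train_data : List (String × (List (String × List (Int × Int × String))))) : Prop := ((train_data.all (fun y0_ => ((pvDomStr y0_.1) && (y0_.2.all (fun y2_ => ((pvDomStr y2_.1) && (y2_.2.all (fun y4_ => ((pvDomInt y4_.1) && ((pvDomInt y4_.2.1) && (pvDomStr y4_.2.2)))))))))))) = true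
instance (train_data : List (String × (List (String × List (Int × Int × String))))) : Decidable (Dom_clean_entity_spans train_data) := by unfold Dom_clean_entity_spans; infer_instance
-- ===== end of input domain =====

-- B trims entity spans by slicing the span text and doing length arithmetic on lstrip()/rstrip()
-- instead of A's per-character pointer-stepping while-loops (objective: idiomatic; return value
-- only — both Pythons mutate annotations['entities'] in place the same way).

-- ===== PORT A =====
-- `text[i].isspace()` as evaluated under A's loop guard (none = IndexError, unreachable inside Pre_)
def pyWsAt (t : List Char) (i : Int) : Bool :=
  match PySem.List.pyGet? t i with
  | some c => PySem.Chars.isspace c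
  | none => false

-- `while start < len(text) and text[start].isspace(): start += 1`
def fwdA (t : List Char) (start : Int) : Int :=
  if h : start < (t.length : Int) ∧ pyWsAt t start = true then fwdA t (start + 1) else start
termination_by ((t.length : Int) - start).toNat
decreasing_by omega

-- `while end > start and text[end - 1].isspace(): end -= 1`
def bwdA (t : List Char) (start e : Int) : Int :=
  if h : start < e ∧ pyWsAt t (e - 1) = true then bwdA t start (e - 1) else e
termination_by (e - start).toNat
decreasing_by omega

-- one iteration of A's outer loop: trim each span, write the list back, emit the pair
def cleanOneA (p : String × List (String × List (Int × Int × String))) :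
    String × List (String × List (Int × Int × String)) :=
  let text := p.1
  let annotations := PySem.Dict.mk p.2
  let entities := annotations.getD "entities" []
  let cleaned_entities := entities.foldl (fun ce sp =>
      let start := fwdA text.toList sp.1
      let stop := bwdA text.toList start sp.2.1
      if start < stop then ce ++ [(start, stop, sp.2.2)] else ce) []
  (text, (annotations.insert "entities" cleaned_entities).items)

def clean_entity_spans (train_data : List (String × (List (String × List (Int × Int × String))))) :
    List (String × (List (String × List (Int × Int × String)))) :=
  train_data.foldl (fun cleaned_data p => cleaned_data ++ [cleanOneA p]) []

-- ===== PORT B =====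
-- _trim(text, span): offsets recovered from the lengths of lstrip()/rstrip() of text[start:end]
def trimB (text : List Char) (span : Int × Int × String) : Option (Int × Int × String) :=
  if span.2.1 ≤ span.1 then none else
  let ls := PySem.Chars.lstrip (PySem.List.slice text (some span.1) (some span.2.1))
  let new_start := span.2.1 - (ls.length : Int)
  let new_end := new_start + ((PySem.Chars.rstrip ls).length : Int)
  if new_start < new_end then some (new_start, new_end, span.2.2) else none

def clean_entity_spans_alt (train_data : List (String × (List (String × List (Int × Int × String))))) :
    List (String × (List (String × List (Int × Int × String)))) :=
  train_data.map (fun p =>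
    let d := PySem.Dict.mk p.2
    (p.1, (d.insert "entities" ((d.getD "entities" []).filterMap (trimB p.1.toList))).items))

-- ===== PRECONDITION & SPEC =====
-- Pre_ requires each annotations dict to carry the 'entities' key (A raises KeyError otherwise) and
-- every span to satisfy 0 ≤ start and end ≤ start (degenerate) or 0 ≤ end ≤ len(text): outside
-- that A either raises IndexError or returns spans shaped by Python's accidental negative-index
-- wraparound — a malformed-span corner no caller would specify.
def Pre_clean_entity_spans (train_data : List (String × (List (String × List (Int × Int × String))))) : Prop :=
  ∀ p ∈ train_data, (PySem.Dict.mk p.2).contains "entities" = true ∧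
    ∀ sp ∈ (PySem.Dict.mk p.2).getD "entities" ([] : List (Int × Int × String)),
      0 ≤ sp.1 ∧ (sp.2.1 ≤ sp.1 ∨ (0 ≤ sp.2.1 ∧ sp.2.1 ≤ (p.1.toList.length : Int)))
instance (train_data : List (String × (List (String × List (Int × Int × String))))) : Decidable (Pre_clean_entity_spans train_data) := by unfold Pre_clean_entity_spans; infer_instance

def pvWitness_clean_entity_spans : (List (String × (List (String × List (Int × Int × String))))) :=
  [(" ab ", [("entities", [(0, 4, "X"), (1, 1, "Y")])])]

def Spec_clean_entity_spans (train_data : List (String × (List (String × List (Int × Int × String))))) (out : List (String × (List (String × List (Int × Int × String))))) : Prop := out = clean_entity_spans_alt train_data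
instance (train_data : List (String × (List (String × List (Int × Int × String))))) (out : List (String × (List (String × List (Int × Int × String))))) : Decidable (Spec_clean_entity_spans train_data out) := by
  unfold Spec_clean_entity_spans
  haveI h1 : DecidableEq (Int × Int × String) := instDecidableEqProd
  haveI h2 : DecidableEq (String × List (Int × Int × String)) := instDecidableEqProd
  haveI h3 : DecidableEq (String × List (String × List (Int × Int × String))) := instDecidableEqProd
  exact List.hasDecEq _ _

-- ===== CLAIM (what is proved, stated in full; the proofs are below) =====
def Claim_equal_clean_entity_spans : Prop := ∀ (train_data : List (String × (List (String × List (Int × Int × String))))), Dom_clean_entity_spans train_data → Pre_clean_entity_spans train_data → Spec_clean_entity_spans train_data (clean_entity_spans train_data)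

-- ===== LEMMAS AND PROOFS =====

-- dropWhile as a drop (not in Mathlib under this phrasing)
theorem dropWhile_eq_drop_len {α : Type} (p : α → Bool) (xs : List α) :
    xs.dropWhile p = xs.drop (xs.takeWhile p).length := by
  induction xs with
  | nil => rfl
  | cons x xs ih => by_cases h : p x <;> simp [h, ih]

-- the element right after the takeWhile-prefix fails the predicate
theorem not_p_at_takeWhile_len {α : Type} (p : α → Bool) (xs : List α)
    (h : (xs.takeWhile p).length < xs.length) :
    p (xs[(xs.takeWhile p).length]'h) = false := by
  induction xs with
  | nil => simp at h
  | cons x xs ih =>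
    by_cases hx : p x
    · simpa [List.takeWhile_cons, hx] using ih (by simpa [List.takeWhile_cons, hx] using h)
    · simp [hx]

theorem rstrip_append (xs : List Char) (c : Char) :
    PySem.Chars.rstrip (xs ++ [c]) =
      if PySem.Chars.isspace c then PySem.Chars.rstrip xs else xs ++ [c] := by
  by_cases h : PySem.Chars.isspace c <;> simp [PySem.Chars.rstrip, h]

theorem pyGet?_toNat (t : List Char) (i : Int) (h : 0 ≤ i) :
    PySem.List.pyGet? t i = t[i.toNat]? := by
  rcases Int.eq_ofNat_of_zero_le h with ⟨n, rfl⟩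
  rw [PySem.List.pyGet?_natCast]
  simp

theorem pyWsAt_eq (t : List Char) (i : Int) (h0 : 0 ≤ i) (h1 : i < (t.length : Int)) :
    pyWsAt t i = PySem.Chars.isspace (t[i.toNat]'(by omega)) := by
  unfold pyWsAt
  rw [pyGet?_toNat t i h0, List.getElem?_eq_getElem (by omega : i.toNat < t.length)]

theorem fwdA_eq (t : List Char) (s : Int) :
    0 ≤ s → fwdA t s = s + (((t.drop s.toNat).takeWhile PySem.Chars.isspace).length : Int) := by
  induction s using fwdA.induct (t := t) with
  | case1 s h ih =>
    intro hs
    obtain ⟨hlt, hws⟩ := h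
    have hn : s.toNat < t.length := by omega
    rw [pyWsAt_eq t s hs hlt] at hws
    rw [fwdA, dif_pos ⟨hlt, by rw [pyWsAt_eq t s hs hlt]; exact hws⟩, ih (by omega)]
    have h1 : (s + 1).toNat = s.toNat + 1 := by omega
    rw [h1, List.drop_eq_getElem_cons hn, List.takeWhile_cons, hws]
    simp only [if_true, List.length_cons]
    omega
  | case2 s h =>
    intro hs
    rw [fwdA, dif_neg h]
    by_cases hlt : s < (t.length : Int)
    · have hws : pyWsAt t s = false := by
        rcases Bool.eq_false_or_eq_true (pyWsAt t s) with htr | hf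
        · exact absurd ⟨hlt, htr⟩ h
        · exact hf
      rw [pyWsAt_eq t s hs hlt] at hws
      have hn : s.toNat < t.length := by omega
      rw [List.drop_eq_getElem_cons hn, List.takeWhile_cons, hws]
      simp
    · rw [List.drop_eq_nil_of_le (by omega : t.length ≤ s.toNat)]
      simp

theorem bwdA_stop (t : List Char) (s e : Int) (h : ¬ s < e) : bwdA t s e = e := by
  rw [bwdA, dif_neg (by intro hc; exact h hc.1)]

theorem bwdA_eq (t : List Char) (s e : Int) :
    0 ≤ s → s < e → e ≤ (t.length : Int) →
    PySem.Chars.isspace (t.getD s.toNat ' ') = false →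
    bwdA t s e =
      s + ((PySem.Chars.rstrip ((t.drop s.toNat).take (e - s).toNat)).length : Int) := by
  induction e using bwdA.induct (t := t) (start := s) with
  | case1 e h ih =>
    intro hs hse hel hns
    obtain ⟨hse', hws⟩ := h
    have h0 : 0 ≤ e - 1 := by omega
    have h1 : e - 1 < (t.length : Int) := by omega
    rw [pyWsAt_eq t (e - 1) h0 h1] at hws
    have hne : s < e - 1 := by
      rcases lt_or_eq_of_le (by omega : s ≤ e - 1) with hlt | heq
      · exact hlt
      · exfalso
        rw [List.getD_eq_getElem t ' ' (by omega : s.toNat < t.length)] at hns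
        simp only [show s.toNat = (e - 1).toNat from by omega] at hns
        rw [hws] at hns
        cases hns
    rw [bwdA, dif_pos ⟨hse', by rw [pyWsAt_eq t (e - 1) h0 h1]; exact hws⟩,
      ih hs hne (by omega) hns]
    have hsplit : (t.drop s.toNat).take (e - s).toNat
        = (t.drop s.toNat).take (e - 1 - s).toNat ++ [t[(e - 1).toNat]'(by omega)] := by
      have hm : (e - s).toNat = (e - 1 - s).toNat + 1 := by omega
      rw [hm, List.take_add_one]
      congr 1
      have hjlt : (e - 1 - s).toNat < (t.drop s.toNat).length := by
        rw [List.length_drop]; omega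
      rw [List.getElem?_eq_getElem hjlt, List.getElem_drop]
      simp only [Option.toList_some]
      simp only [show s.toNat + (e - 1 - s).toNat = (e - 1).toNat from by omega]
    rw [hsplit, rstrip_append, if_pos hws]
  | case2 e h =>
    intro hs hse hel hns
    have hws : pyWsAt t (e - 1) = false := by
      rcases Bool.eq_false_or_eq_true (pyWsAt t (e - 1)) with htr | hf
      · exact absurd ⟨hse, htr⟩ h
      · exact hf
    have h0 : 0 ≤ e - 1 := by omega
    have h1 : e - 1 < (t.length : Int) := by omega
    rw [pyWsAt_eq t (e - 1) h0 h1] at hws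
    rw [bwdA, dif_neg h]
    have hm : (e - s).toNat = (e - 1 - s).toNat + 1 := by omega
    have hjlt : (e - 1 - s).toNat < (t.drop s.toNat).length := by
      rw [List.length_drop]; omega
    have hsplit : (t.drop s.toNat).take (e - s).toNat
        = (t.drop s.toNat).take (e - 1 - s).toNat ++ [t[(e - 1).toNat]'(by omega)] := by
      rw [hm, List.take_add_one]
      congr 1
      rw [List.getElem?_eq_getElem hjlt, List.getElem_drop]
      simp only [Option.toList_some]
      simp only [show s.toNat + (e - 1 - s).toNat = (e - 1).toNat from by omega]
    rw [hsplit, rstrip_append, if_neg (by rw [hws]; exact Bool.false_ne_true)]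
    rw [List.length_append, List.length_take, List.length_drop]
    simp only [List.length_singleton]
    omega

theorem span_eq (t : List Char) (s e : Int) (l : String)
    (hs : 0 ≤ s) (hd : e ≤ s ∨ (0 ≤ e ∧ e ≤ (t.length : Int))) :
    (if fwdA t s < bwdA t (fwdA t s) e then
        some (fwdA t s, bwdA t (fwdA t s) e, l) else none) = trimB t (s, e, l) := by
  by_cases hes : e ≤ s
  · -- degenerate span: A's loops leave end ≤ start, B's guard fires
    have hfs := fwdA_eq t s hs
    have hge : ¬ (s + ((((t.drop s.toNat).takeWhile PySem.Chars.isspace).length : Nat) : Int) < e) := by omega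
    rw [hfs, bwdA_stop t _ e hge, if_neg hge]
    unfold trimB
    rw [if_pos (show (s, e, l).2.1 ≤ (s, e, l).1 from hes)]
  obtain ⟨he, hel⟩ : 0 ≤ e ∧ e ≤ (t.length : Int) := hd.resolve_left hes
  have hDlen : (t.drop s.toNat).length = t.length - s.toNat := List.length_drop
  set D := t.drop s.toNat with hD
  set k := (D.takeWhile PySem.Chars.isspace).length with hk
  have hkle : k ≤ D.length := (List.takeWhile_prefix _).length_le
  have hfs := fwdA_eq t s hs
  have hslice : PySem.List.slice t (some s) (some e) = D.take (e.toNat - s.toNat) := by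
    rw [PySem.List.slice_toNat t hs he]
  set m := e.toNat - s.toNat with hm
  have hmle : m ≤ D.length := by omega
  have htkw : (D.take m).takeWhile PySem.Chars.isspace
      = (D.takeWhile PySem.Chars.isspace).take m := List.take_takeWhile.symm
  have hls : PySem.Chars.lstrip (D.take m) = (D.take m).drop (min m k) := by
    unfold PySem.Chars.lstrip
    rw [dropWhile_eq_drop_len, htkw, List.length_take]
  by_cases hkm : k < m
  · -- a whitespace prefix shorter than the span: both produce the span (s+k, …)
    have hem : e = s + (m : Int) := by omega
    have hminmk : min m k = k := by omega
    have hlsl : PySem.Chars.lstrip (D.take m) = (D.drop k).take (m - k) := by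
      rw [hls, hminmk, List.drop_take]
    have hlen_ls : (PySem.Chars.lstrip (D.take m)).length = m - k := by
      rw [hlsl, List.length_take, List.length_drop]
      omega
    have hkD : k < D.length := by omega
    have hcharA : PySem.Chars.isspace (D[k]'hkD) = false :=
      not_p_at_takeWhile_len _ D (hk ▸ hkD)
    have hsk : (s + (k : Int)).toNat = s.toNat + k := by omega
    have hgetD : t.getD (s + (k : Int)).toNat ' ' = D[k]'hkD := by
      rw [List.getD_eq_getElem t ' ' (show (s + (k : Int)).toNat < t.length by omega)]
      simp only [hD, List.getElem_drop, hsk]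
    have hdropdrop : t.drop ((s + (k : Int)).toNat) = D.drop k := by
      rw [hD, List.drop_drop, hsk]
    have hek : (e - (s + (k : Int))).toNat = m - k := by omega
    have hb := bwdA_eq t (s + (k : Int)) e (by omega) (by omega) hel
      (by rw [hgetD]; exact hcharA)
    rw [hdropdrop, hek] at hb
    rw [hfs, hb]
    unfold trimB
    rw [if_neg (show ¬ (s, e, l).2.1 ≤ (s, e, l).1 from hes)]
    simp only
    rw [hslice, hlsl]
    have hlen' : (List.take (m - k) (List.drop k D)).length = m - k := by
      rw [List.length_take, List.length_drop]
      omega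
    rw [hlen']
    have hns2 : e - ((m - k : Nat) : Int) = s + (k : Int) := by omega
    rw [hns2]
  · -- the whole span is whitespace (or empty): both drop it
    have hminmk : min m k = m := by omega
    have hls0 : PySem.Chars.lstrip (D.take m) = [] := by
      rw [hls, hminmk]
      apply List.drop_eq_nil_of_le
      rw [List.length_take]
      omega
    have hge : ¬ (s + (k : Int) < e) := by omega
    rw [hfs, bwdA_stop t (s + (k : Int)) e hge, if_neg hge]
    unfold trimB
    rw [if_neg (show ¬ (s, e, l).2.1 ≤ (s, e, l).1 from hes)]
    simp only
    rw [hslice, hls0]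
    simp [PySem.Chars.rstrip]

theorem inner_eq (t : List Char) (ents : List (Int × Int × String))
    (acc : List (Int × Int × String))
    (h : ∀ sp ∈ ents, 0 ≤ sp.1 ∧ (sp.2.1 ≤ sp.1 ∨ (0 ≤ sp.2.1 ∧ sp.2.1 ≤ (t.length : Int)))) :
    ents.foldl (fun ce sp =>
        if fwdA t sp.1 < bwdA t (fwdA t sp.1) sp.2.1 then
          ce ++ [(fwdA t sp.1, bwdA t (fwdA t sp.1) sp.2.1, sp.2.2)] else ce) acc
      = acc ++ ents.filterMap (trimB t) := by
  induction ents generalizing acc with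
  | nil => simp
  | cons sp rest ih =>
    obtain ⟨h1, h2⟩ := h sp (List.mem_cons_self)
    have hsp := span_eq t sp.1 sp.2.1 sp.2.2 h1 h2
    simp only [List.foldl_cons, List.filterMap_cons]
    rw [ih _ (fun q hq => h q (List.mem_cons_of_mem _ hq))]
    cases htr : trimB t (sp.1, sp.2.1, sp.2.2) with
    | none =>
      rw [htr] at hsp
      have hc : ¬ fwdA t sp.1 < bwdA t (fwdA t sp.1) sp.2.1 := by
        intro hc
        rw [if_pos hc] at hsp
        cases hsp
      rw [if_neg hc]
    | some v =>
      rw [htr] at hsp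
      have hc : fwdA t sp.1 < bwdA t (fwdA t sp.1) sp.2.1 := by
        by_contra hc
        rw [if_neg hc] at hsp
        cases hsp
      rw [if_pos hc] at hsp ⊢
      rw [Option.some.injEq] at hsp
      rw [hsp, List.append_assoc, List.singleton_append]

-- ===== VERDICT (by name: the statement is the Claim_ definition above) =====
theorem clean_entity_spans_spec : Claim_equal_clean_entity_spans := by
  intro td hdom hpre
  unfold Spec_clean_entity_spans clean_entity_spans clean_entity_spans_alt
  rw [PySem.List.foldl_append_singleton_eq_map cleanOneA td [], List.nil_append]
  apply List.map_congr_left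
  intro p hp
  obtain ⟨hkey, hsp⟩ := hpre p hp
  unfold cleanOneA
  simp only []
  rw [inner_eq p.1.toList _ [] hsp, List.nil_append]
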